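-- pv_equiv track=rewrite | github.com/mdarikrayhan/Competitive-Programming | codeforces/1922/E.py | calculate_ans
-- ===== SOURCE A (Python) =====
-- def calculate_ans(n):
--     ans=[]
--     n=n-1
--     temp=1
--     tempval=0
--     while n>=temp:
--         n-=temp
--         temp*=2
--         ans.append(tempval)
--         tempval+=1
--
--     tempval=len(ans)-1
--     while n!=0:
--         x=2**tempval
--         if n>=x:
--             ans.append(tempval)
--             n-=x
--         tempval-=1
--
--     return ans
-- ===== SOURCE B (Python) =====
-- def calculate_ans(n):
--     # Single pass over the binary digits of n: shift n right one bit at a time,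
--     # appending the position to the prefix and, when the bit is set, prepending
--     # it to the suffix (so the suffix comes out in descending order).
--     pre = []
--     suf = []
--     i = 0
--     m = n
--     while m > 1:
--         if m & 1:
--             suf.insert(0, i)
--         pre.append(i)
--         m >>= 1
--         i += 1
--     return pre + suf
-- ===== Notes on version B (the rewrite author's own statement) =====
-- stated objective: alternative
-- what changed: Replaces A's two staged greedy-subtraction loops (find the largest power prefix, then trial-subtract descending powers) with one pass that shifts n right bit by bit, appending each position to a prefix list and prepending set-bit positions to a suffix list; no powers are ever computed or subtracted.
-- outside the precondition, e.g. on calculate_ans(0): A does not finish within the time limit, B returns []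
import Mathlib
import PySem

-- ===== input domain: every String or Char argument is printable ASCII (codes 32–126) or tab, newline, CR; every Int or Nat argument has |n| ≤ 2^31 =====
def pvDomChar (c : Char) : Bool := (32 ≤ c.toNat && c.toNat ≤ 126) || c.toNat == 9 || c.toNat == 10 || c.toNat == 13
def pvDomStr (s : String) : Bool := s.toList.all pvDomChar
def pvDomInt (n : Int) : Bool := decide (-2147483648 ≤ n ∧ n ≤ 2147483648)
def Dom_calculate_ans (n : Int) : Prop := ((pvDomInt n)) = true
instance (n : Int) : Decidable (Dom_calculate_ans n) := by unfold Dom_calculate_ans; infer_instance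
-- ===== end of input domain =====

-- B replaces A's two staged greedy-subtraction loops by one right-shift pass over the
-- binary digits of n, building the prefix and the descending suffix simultaneously
-- (objective: alternative single-pass algorithm, no powers computed or subtracted).

-- ===== PORT A =====
-- first while loop: while n >= temp: n -= temp; temp *= 2; ans.append(tempval); tempval += 1
-- the '1 ≤ temp' conjunct is a totality guard only (temp starts at 1 and only doubles, so it
-- holds on every reachable call); it lets Lean see n.toNat decrease.
def pvLoop1 (n temp tv : Int) (acc : List Int) : List Int × Int :=
  if temp ≤ n ∧ 1 ≤ temp then
    pvLoop1 (n - temp) (temp * 2) (tv + 1) (acc ++ [tv])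
  else (acc, n)
termination_by n.toNat
decreasing_by omega

-- second while loop: while n != 0: x = 2**tempval; if n >= x: append, n -= x; tempval -= 1
-- the 'tv < 0' early return is a totality guard: there Python computes float powers and never
-- terminates (reachable only for n ≤ 0, outside Pre_); for tv ≥ 0, 2**tv = 2 ^ tv.toNat exactly.
def pvLoop2 (n tv : Int) (acc : List Int) : List Int :=
  if n = 0 then acc
  else if tv < 0 then acc
  else
    let x : Int := (2 : Int) ^ tv.toNat
    if x ≤ n then pvLoop2 (n - x) (tv - 1) (acc ++ [tv])
    else pvLoop2 n (tv - 1) acc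
termination_by (tv + 1).toNat
decreasing_by all_goals omega

def calculate_ans (n : Int) : List Int :=
  let p := pvLoop1 (n - 1) 1 0 []
  pvLoop2 p.2 ((p.1.length : Int) - 1) p.1

-- ===== PORT B =====
-- while m > 1: if m & 1: suf.insert(0, i); pre.append(i); m >>= 1; i += 1
def pvBLoop (m i : Int) (pre suf : List Int) : List Int × List Int :=
  if 1 < m then
    pvBLoop (m >>> (1 : Nat)) (i + 1) (pre ++ [i])
      (if PySem.Int.band m 1 != 0 then i :: suf else suf)
  else (pre, suf)
termination_by m.toNat
decreasing_by
  have : m >>> (1 : Nat) = m / 2 := by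
    simp [Int.shiftRight_eq_div_pow]
  omega

def calculate_ans_alt (n : Int) : List Int :=
  let p := pvBLoop n 0 [] []
  p.1 ++ p.2

-- ===== PRECONDITION & SPEC =====
-- Pre_ excludes n ≤ 0: there A never terminates (its second loop decrements tempval forever),
-- so A returns on exactly the inputs with 1 ≤ n.
def Pre_calculate_ans (n : Int) : Prop := 1 ≤ n
instance (n : Int) : Decidable (Pre_calculate_ans n) := by unfold Pre_calculate_ans; infer_instance
def pvWitness_calculate_ans : Int := (5)

def Spec_calculate_ans (n : Int) (out : List Int) : Prop := out = calculate_ans_alt n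
instance (n : Int) (out : List Int) : Decidable (Spec_calculate_ans n out) := by unfold Spec_calculate_ans; infer_instance

-- ===== CLAIM (what is proved, stated in full; the proofs are below) =====
def Claim_equal_calculate_ans : Prop := ∀ (n : Int), Dom_calculate_ans n → Pre_calculate_ans n → Spec_calculate_ans n (calculate_ans n)

-- ===== LEMMAS AND PROOFS =====

-- the bit test '(↑m >> i) & 1 != 0' is the Nat bit m / 2^i % 2 == 1
theorem pvTb (m i : Nat) :
    (PySem.Int.band (((m : Nat) : Int) >>> ((i : Nat) : Int)) 1 != 0) = (m / 2 ^ i % 2 == 1) := by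
  have hs : (((m : Nat) : Int) >>> ((i : Nat) : Int)) = ((m >>> i : Nat) : Int) := by simp
  have h1 : (1 : Int) = ((1 : Nat) : Int) := by norm_num
  rw [hs, h1, PySem.Int.band_natCast, Nat.and_one_is_mod, Nat.shiftRight_eq_div_pow]
  rcases Nat.mod_two_eq_zero_or_one (m / 2 ^ i) with h | h <;> rw [h] <;> decide

theorem pvDivHigh (R t : Nat) (h1 : 2 ^ t ≤ R) (h2 : R < 2 ^ (t + 1)) : R / 2 ^ t % 2 = 1 := by
  have hp : 2 ^ (t + 1) = 2 ^ t * 2 := pow_succ 2 t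
  have : R / 2 ^ t = 1 := Nat.div_eq_of_lt_le (by omega) (by omega)
  rw [this]

theorem pvDivLow (R t : Nat) (h : R < 2 ^ t) : R / 2 ^ t % 2 = 0 := by
  rw [Nat.div_eq_of_lt h]

theorem pvDivMid (R' t i : Nat) (hi : i < t) : (R' + 2 ^ t) / 2 ^ i % 2 = R' / 2 ^ i % 2 := by
  have e : 2 ^ t = 2 ^ (t - i) * 2 ^ i := by rw [← pow_add]; congr 1; omega
  have hpos : 0 < 2 ^ i := Nat.two_pow_pos i
  rw [e, Nat.add_mul_div_right _ _ hpos,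
    show t - i = (t - i - 1) + 1 from by omega, pow_succ',
    Nat.add_mul_mod_self_left]

-- A's first loop, characterised: starting at temp = 2^t, tv = t, it runs exactly d times when
-- 2^(t+d) - 2^t ≤ m < 2^(t+d+1) - 2^t, appending t, …, t+d-1 and leaving m - (2^(t+d) - 2^t).
theorem pvLoop1_spec (d : Nat) : ∀ (t : Nat) (m : Int) (acc : List Int),
    (2 : Int) ^ (t + d) - 2 ^ t ≤ m → m < 2 ^ (t + d + 1) - 2 ^ t →
    pvLoop1 m ((2 : Int) ^ t) (t : Int) acc
      = (acc ++ (List.range' t d).map (fun (i : Nat) => (i : Int)), m - ((2 : Int) ^ (t + d) - 2 ^ t)) := by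
  induction d with
  | zero =>
    intro t m acc h1 h2
    rw [pvLoop1]
    have hs : (2 : Int) ^ (t + 0 + 1) = 2 ^ t * 2 := by
      rw [show (t + 0 + 1 : Nat) = t + 1 from by omega]; exact pow_succ 2 t
    have hlt : ¬ ((2 : Int) ^ t ≤ m) := by omega
    simp only [hlt, false_and, if_false]
    simp
  | succ d ih =>
    intro t m acc h1 h2
    have hp : (0 : Int) < 2 ^ t := by positivity
    have hd : (2 : Int) ^ (t + 1) ≤ 2 ^ (t + (d + 1)) := by
      apply pow_le_pow_right₀ <;> omega
    have hs1 : (2 : Int) ^ (t + 1) = 2 ^ t * 2 := pow_succ 2 t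
    have hcond : (2 : Int) ^ t ≤ m ∧ 1 ≤ (2 : Int) ^ t := ⟨by omega, by omega⟩
    rw [pvLoop1]
    simp only [hcond, and_self, if_true]
    have e2 : ((t : Int)) + 1 = ((t + 1 : Nat) : Int) := by push_cast; ring
    have hs2 : (2 : Int) ^ (t + 1 + d) = 2 ^ (t + (d + 1)) := by
      rw [show (t + 1 + d : Nat) = t + (d + 1) from by omega]
    have hs3 : (2 : Int) ^ (t + (d + 1) + 1) = 2 ^ (t + (d + 1)) * 2 := pow_succ 2 _
    have hs4 : (2 : Int) ^ (t + 1 + d + 1) = 2 ^ (t + 1 + d) * 2 := pow_succ 2 _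
    rw [← hs1, e2, ih (t + 1) (m - 2 ^ t) (acc ++ [(t : Int)])
      (by rw [hs2, hs1]; omega) (by rw [hs4, hs2, hs1]; omega)]
    rw [Prod.mk.injEq]
    constructor
    · rw [List.range'_succ]; simp
    · rw [hs2]; ring_nf

-- A's second loop equals the descending bit filter over pyRange
theorem pvLoop2_spec (t : Nat) : ∀ (R : Nat) (acc : List Int), R < 2 ^ t →
    pvLoop2 ((R : Nat) : Int) ((t : Int) - 1) acc
      = acc ++ (PySem.List.pyRange ((t : Int) - 1) (-1) (-1)).filter
          (fun i => PySem.Int.band (((R : Nat) : Int) >>> i.toNat) 1 != 0) := by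
  induction t with
  | zero =>
    intro R acc h
    have hR0 : R = 0 := by omega
    subst hR0
    rw [pvLoop2]
    norm_num [PySem.List.pyRange_neg_one_eq_nil]
  | succ t ih =>
    intro R acc hlt
    have e : ((t + 1 : Nat) : Int) - 1 = (t : Int) := by push_cast; ring
    rw [e]
    have hp2 : 2 ^ (t + 1) = 2 ^ t * 2 := pow_succ 2 t
    by_cases hR0 : R = 0
    · subst hR0
      rw [pvLoop2]
      norm_num
      intro a _ _
      decide
    · rw [pvLoop2]
      have hne : ((R : Nat) : Int) ≠ 0 := by exact_mod_cast hR0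
      have hnn : ¬ ((t : Int) < 0) := by omega
      simp only [hne, if_false, hnn]
      have htn : ((t : Int)).toNat = t := Int.toNat_natCast t
      rw [htn]
      have hcast : ((2 : Int) ^ t ≤ ((R : Nat) : Int)) ↔ 2 ^ t ≤ R := by
        constructor <;> intro h <;> exact_mod_cast h
      have hcons : PySem.List.pyRange ((t : Int)) (-1) (-1)
          = (t : Int) :: PySem.List.pyRange ((t : Int) - 1) (-1) (-1) :=
        PySem.List.pyRange_neg_one_cons (by omega)
      by_cases hge : 2 ^ t ≤ R
      · have hsub : ((R : Nat) : Int) - 2 ^ t = ((R - 2 ^ t : Nat) : Int) := by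
          push_cast [hge]; ring
        rw [if_pos (hcast.mpr hge), hsub, ih (R - 2 ^ t) (acc ++ [(t : Int)]) (by omega)]
        rw [hcons, List.filter_cons]
        simp only [htn]
        have hhead : (PySem.Int.band (((R : Nat) : Int) >>> (((t : Nat) : Nat) : Int)) 1 != 0) = true := by
          rw [pvTb, pvDivHigh R t hge hlt]; rfl
        rw [hhead]
        simp only [if_true, List.append_assoc, List.singleton_append]
        congr 1
        congr 1
        apply List.filter_congr
        intro i hi
        have hmem := (PySem.List.mem_pyRange_neg_one.mp hi)
        have hit : i = ((i.toNat : Nat) : Int) := by omega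
        have hlt' : i.toNat < t := by omega
        rw [hit, Int.toNat_natCast, pvTb, pvTb,
          show R = (R - 2 ^ t) + 2 ^ t from by omega, pvDivMid _ t _ hlt']
        simp [Nat.sub_add_cancel hge]
      · rw [if_neg (fun h => hge (hcast.mp h)), ih R acc (by omega)]
        rw [hcons, List.filter_cons]
        simp only [htn]
        have hhead : (PySem.Int.band (((R : Nat) : Int) >>> (((t : Nat) : Nat) : Int)) 1 != 0) = false := by
          rw [pvTb, pvDivLow R t (by omega)]; rfl
        rw [hhead]
        simp

-- the pyRange-filter form of A's suffix equals the reversed ascending-filter form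
theorem pvBridge (k : Nat) (R : Nat) :
    (PySem.List.pyRange ((k : Int) - 1) (-1) (-1)).filter
        (fun i => PySem.Int.band (((R : Nat) : Int) >>> i.toNat) 1 != 0)
      = ((List.range' 0 k).filter (fun j => R / 2 ^ j % 2 == 1)).reverse.map
          (fun (j : Nat) => (j : Int)) := by
  induction k with
  | zero =>
    rw [PySem.List.pyRange_neg_one_eq_nil (by norm_num)]
    simp
  | succ k ih =>
    have e : ((k + 1 : Nat) : Int) - 1 = (k : Int) := by push_cast; ring
    rw [e, PySem.List.pyRange_neg_one_cons (by omega), List.filter_cons]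
    have hrc : List.range' 0 (k + 1) = List.range' 0 k ++ [k] := by
      have := List.range'_concat (s := 0) (n := k) (step := 1); simpa using this
    rw [hrc, List.filter_append, List.filter_cons, List.filter_nil]
    have htn : ((k : Int)).toNat = k := Int.toNat_natCast k
    by_cases hb : R / 2 ^ k % 2 = 1
    · have hhead : (PySem.Int.band (((R : Nat) : Int) >>> ((((k : Int)).toNat : Nat) : Int)) 1 != 0) = true := by
        rw [htn, pvTb, hb]; rfl
      have hbb : (R / 2 ^ k % 2 == 1) = true := by rw [hb]; rfl
      simp only [hhead, hbb, if_true, ih]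
      simp
    · have hhead : (PySem.Int.band (((R : Nat) : Int) >>> ((((k : Int)).toNat : Nat) : Int)) 1 != 0) = false := by
        rw [htn, pvTb]
        rcases Nat.mod_two_eq_zero_or_one (R / 2 ^ k) with h | h
        · rw [h]; rfl
        · exact absurd h hb
      have hbb : (R / 2 ^ k % 2 == 1) = false := by
        rcases Nat.mod_two_eq_zero_or_one (R / 2 ^ k) with h | h
        · rw [h]; rfl
        · exact absurd h hb
      simp only [hhead, hbb, ih]
      simp

-- B's loop, characterised: for 2^t ≤ M < 2^(t+1) it runs exactly t times, appending
-- i, i+1, …, i+t-1 to the prefix and prepending the set-bit positions (offset by i).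
theorem pvBLoop_spec (t : Nat) : ∀ (M : Nat) (i : Int) (pre suf : List Int),
    2 ^ t ≤ M → M < 2 ^ (t + 1) →
    pvBLoop ((M : Nat) : Int) i pre suf
      = (pre ++ (List.range' 0 t).map (fun (j : Nat) => (j : Int) + i),
         ((List.range' 0 t).filter (fun j => M / 2 ^ j % 2 == 1)).reverse.map
             (fun (j : Nat) => (j : Int) + i) ++ suf) := by
  induction t with
  | zero =>
    intro M i pre suf h1 h2
    have hM : M = 1 := by omega
    subst hM
    rw [pvBLoop]
    norm_num
  | succ t ih =>
    intro M i pre suf h1 h2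
    have hp : 2 ^ (t + 1) = 2 ^ t * 2 := pow_succ 2 t
    have hp2 : 2 ^ (t + 2) = 2 ^ (t + 1) * 2 := pow_succ 2 (t + 1)
    have hM2 : 2 ≤ M := by omega
    have hcond : (1 : Int) < ((M : Nat) : Int) := by exact_mod_cast hM2
    rw [pvBLoop, if_pos hcond]
    have hshift : ((M : Nat) : Int) >>> (1 : Nat) = ((M / 2 : Nat) : Int) := by
      rw [Int.shiftRight_eq_div_pow]; omega
    have hband : (PySem.Int.band ((M : Nat) : Int) 1 != 0) = (M % 2 == 1) := by
      have := pvTb M 0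
      simpa using this
    rw [hshift, hband,
      ih (M / 2) (i + 1) (pre ++ [i]) (if (M % 2 == 1) = true then i :: suf else suf)
        (by omega) (by omega)]
    have hr1 : List.range' 1 t = (List.range' 0 t).map (· + 1) := by
      simp only [List.range'_eq_map_range, List.map_map]
      exact List.map_congr_left (fun a _ => by simp; omega)
    have hrc : List.range' 0 (t + 1) = 0 :: (List.range' 0 t).map (· + 1) := by
      rw [List.range'_succ, hr1]
    have hpred : ∀ a : Nat, (M / 2 ^ (a + 1) % 2 == 1) = (M / 2 / 2 ^ a % 2 == 1) := by
      intro a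
      rw [Nat.div_div_eq_div_mul, ← pow_succ']
    have hf : List.filter (fun j => M / 2 ^ j % 2 == 1) ((List.range' 0 t).map (· + 1))
        = ((List.range' 0 t).filter (fun j => M / 2 / 2 ^ j % 2 == 1)).map (· + 1) := by
      rw [List.filter_map]
      congr 1
      apply List.filter_congr
      intro a _
      simp only [Function.comp_apply]
      exact hpred a
    have hmapped : ∀ l : List Nat,
        List.map (fun j : Nat => (j : Int) + i) ((l.map (· + 1)).reverse)
          = List.map (fun j : Nat => (j : Int) + (i + 1)) l.reverse := by
      intro l
      rw [← List.map_reverse, List.map_map]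
      apply List.map_congr_left
      intro a _
      simp only [Function.comp_apply]
      push_cast
      ring
    rw [Prod.mk.injEq]
    constructor
    · rw [hrc]
      simp only [List.map_cons, List.map_map, Nat.cast_zero, zero_add, List.append_assoc,
        List.singleton_append]
      congr 2
      apply List.map_congr_left
      intro a _
      simp only [Function.comp_apply]
      push_cast
      ring
    · rw [hrc, List.filter_cons, hf]
      by_cases h0 : M % 2 = 1
      · have h0b : (M / 2 ^ 0 % 2 == 1) = true := by simpa using h0
        have h0c : (M % 2 == 1) = true := by simpa using h0
        simp only [h0b, h0c, if_true, List.reverse_cons, List.map_append, hmapped]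
        simp
      · have h0b : (M / 2 ^ 0 % 2 == 1) = false := by
          simp only [pow_zero, Nat.div_one]
          rcases Nat.mod_two_eq_zero_or_one M with h | h
          · rw [h]; rfl
          · exact absurd h h0
        have h0c : (M % 2 == 1) = false := by simpa using h0b
        simp only [h0b, h0c, Bool.false_eq_true, if_false, hmapped]

-- ===== VERDICT (by name: the statement is the Claim_ definition above) =====
theorem calculate_ans_spec : Claim_equal_calculate_ans := by
  intro n _ hpre
  unfold Pre_calculate_ans at hpre
  unfold Spec_calculate_ans
  have hlt2 := PySem.Int.lt_two_pow_bitLength n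
  have hle2 := PySem.Int.two_pow_bitLength_le n (by omega)
  have hblpos : PySem.Int.bitLength n ≠ 0 := by
    intro h0; rw [h0] at hlt2; simp at hlt2; omega
  set bl := PySem.Int.bitLength n with hbl
  set k := bl - 1 with hk
  have hblk : bl = k + 1 := by omega
  have hnb : ((n.natAbs : Nat) : Int) = n := Int.natAbs_of_nonneg (by omega)
  rw [hblk] at hlt2
  have hlo : (2 : Int) ^ k ≤ n := by
    calc (2 : Int) ^ k = ((2 ^ k : Nat) : Int) := by push_cast; ring
    _ ≤ ((n.natAbs : Nat) : Int) := by exact_mod_cast hle2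
    _ = n := hnb
  have hhi : n < 2 ^ (k + 1) := by
    calc n = ((n.natAbs : Nat) : Int) := hnb.symm
    _ < ((2 ^ (k + 1) : Nat) : Int) := by exact_mod_cast hlt2
    _ = 2 ^ (k + 1) := by push_cast; ring
  have hs : (2 : Int) ^ (k + 1) = 2 ^ k * 2 := pow_succ 2 k
  -- M := n as a Nat, with 2^k ≤ M < 2^(k+1)
  set M : Nat := n.toNat with hM
  have hMn : ((M : Nat) : Int) = n := by omega
  have hMlo : 2 ^ k ≤ M := by
    have : ((2 ^ k : Nat) : Int) ≤ ((M : Nat) : Int) := by rw [hMn]; push_cast; omega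
    exact_mod_cast this
  have hMhi : M < 2 ^ (k + 1) := by
    have : ((M : Nat) : Int) < ((2 ^ (k + 1) : Nat) : Int) := by rw [hMn]; push_cast; omega
    exact_mod_cast this
  -- characterise A's first loop
  have H1 := pvLoop1_spec k 0 (n - 1) []
    (by simp only [Nat.zero_add, pow_zero]; omega)
    (by simp only [Nat.zero_add, pow_zero]; omega)
  simp only [pow_zero, Nat.cast_zero, Nat.zero_add, List.nil_append] at H1
  set R : Nat := (n - 2 ^ k).toNat with hR
  have hRc : n - 1 - ((2 : Int) ^ k - 1) = ((R : Nat) : Int) := by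
    rw [hR]; omega
  have hRlt : R < 2 ^ k := by
    have : ((R : Nat) : Int) < ((2 ^ k : Nat) : Int) := by
      rw [hR]; push_cast; omega
    exact_mod_cast this
  have hMR : M = R + 2 ^ k := by
    have : ((M : Nat) : Int) = ((R + 2 ^ k : Nat) : Int) := by
      rw [hMn, hR]; push_cast; omega
    exact_mod_cast this
  -- LHS: A
  simp only [calculate_ans]
  rw [H1, hRc]
  simp only [List.length_map, List.length_range']
  rw [pvLoop2_spec k R _ hRlt, pvBridge k R]
  -- RHS: B
  simp only [calculate_ans_alt]
  rw [← hMn, pvBLoop_spec k M 0 [] [] hMlo hMhi]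
  simp only [List.append_nil, add_zero]
  congr 1
  congr 1
  congr 1
  apply List.filter_congr
  intro j hj
  have hjlt : j < k := by
    have := List.mem_range'_1.mp hj
    omega
  rw [hMR, pvDivMid R k j hjlt]
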